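-- pv_equiv track=rewrite | github.com/S1lentem/MMod | lab1sema.py | get_drv_function
-- ===== SOURCE A (Python) =====
-- def get_drv_function(rv_list_map):
--     rv_function_list = []
--     rv_density_list = list(rv_list_map.values())
--     for i in range(len(rv_list_map)):
--         rv_f = 0
--         for j in range(i+1):
--             rv_f += rv_density_list[j]
--         rv_function_list.append(rv_f)
--     return rv_function_list
-- ===== SOURCE B (Python) =====
-- def get_drv_function(rv_list_map):
--     rv_function_list = []
--     running = 0
--     for density in rv_list_map.values():
--         running += density
--         rv_function_list.append(running)
--     return rv_function_list
-- ===== Notes on version B (the rewrite author's own statement) =====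
-- stated objective: faster
-- what changed: Replaced the quadratic re-summation of the first i+1 densities for every index with a single pass keeping a running prefix sum.
import Mathlib
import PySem

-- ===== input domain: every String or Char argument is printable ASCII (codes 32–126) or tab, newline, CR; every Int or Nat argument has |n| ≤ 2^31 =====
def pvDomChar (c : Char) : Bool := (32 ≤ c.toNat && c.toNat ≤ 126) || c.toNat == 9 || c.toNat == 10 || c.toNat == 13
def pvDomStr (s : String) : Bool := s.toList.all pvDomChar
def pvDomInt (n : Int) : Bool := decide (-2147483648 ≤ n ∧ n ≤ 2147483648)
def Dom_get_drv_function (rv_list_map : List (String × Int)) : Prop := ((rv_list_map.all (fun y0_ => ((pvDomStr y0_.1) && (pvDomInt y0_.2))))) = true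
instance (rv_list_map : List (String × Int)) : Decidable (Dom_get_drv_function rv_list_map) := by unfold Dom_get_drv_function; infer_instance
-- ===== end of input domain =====

-- B replaces A's quadratic per-index re-summation of the densities with one running prefix sum (objective: faster, O(n^2) → O(n)).

-- ===== PORT A =====
def get_drv_function (rv_list_map : List (String × Int)) : List Int :=
  let rv_density_list := (PySem.Dict.ofList rv_list_map).values
  (PySem.List.pyRange 0 ((PySem.Dict.ofList rv_list_map).size : Int) 1).foldl
    (fun rv_function_list i =>
      rv_function_list ++
        [(PySem.List.pyRange 0 (i + 1) 1).foldl
          (fun rv_f j => rv_f + PySem.List.pyGetD rv_density_list j 0) 0])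
    []

-- ===== PORT B =====
def get_drv_function_alt (rv_list_map : List (String × Int)) : List Int :=
  ((PySem.Dict.ofList rv_list_map).values.foldl
    (fun (st : List Int × Int) density => (st.1 ++ [st.2 + density], st.2 + density))
    ([], 0)).1

-- ===== PRECONDITION & SPEC =====
def Spec_get_drv_function (rv_list_map : List (String × Int)) (out : List Int) : Prop := out = get_drv_function_alt rv_list_map
instance (rv_list_map : List (String × Int)) (out : List Int) : Decidable (Spec_get_drv_function rv_list_map out) := by unfold Spec_get_drv_function; infer_instance

-- ===== CLAIM (what is proved, stated in full; the proofs are below) =====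
def Claim_equal_get_drv_function : Prop := ∀ (rv_list_map : List (String × Int)), Dom_get_drv_function rv_list_map → Spec_get_drv_function rv_list_map (get_drv_function rv_list_map)

-- ===== LEMMAS AND PROOFS =====

/-- Running prefix sums of `l` starting from accumulated value `s`. -/
def prefSums (s : Int) : List Int → List Int
  | [] => []
  | v :: t => (s + v) :: prefSums (s + v) t

theorem bfold_eq (l : List Int) (acc : List Int) (s : Int) :
    (l.foldl (fun (st : List Int × Int) v => (st.1 ++ [st.2 + v], st.2 + v)) (acc, s)).1
      = acc ++ prefSums s l := by
  induction l generalizing acc s with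
  | nil => simp [prefSums]
  | cons v t ih => simp [prefSums, List.foldl_cons, ih]

theorem afold_eq (l : List Int) (s : Int) :
    (List.range l.length).map
        (fun k => s + ((List.range (k + 1)).map (fun j => l.getD j 0)).sum)
      = prefSums s l := by
  induction l generalizing s with
  | nil => simp [prefSums]
  | cons v t ih =>
    simp only [List.length_cons, List.range_succ_eq_map, List.map_cons, List.map_map,
      prefSums]
    refine List.cons_eq_cons.mpr ⟨?_, ?_⟩
    · simp
    · rw [← ih (s + v)]
      apply List.map_congr_left
      intro k _
      simp only [Function.comp_apply, List.range_succ_eq_map, List.map_cons, List.map_map,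
        List.sum_cons]
      simp [Function.comp_def, add_assoc]

theorem inner_eq (l : List Int) (k : Nat) :
    (PySem.List.pyRange 0 ((k : Int) + 1) 1).foldl
        (fun rv_f j => rv_f + PySem.List.pyGetD l j 0) 0
      = ((List.range (k + 1)).map (fun j => l.getD j 0)).sum := by
  have hcast : ((k : Int) + 1) = ((k + 1 : Nat) : Int) := by push_cast; ring
  rw [hcast, PySem.List.pyRange_zero_natCast, PySem.List.foldl_add]
  simp [List.map_map, Function.comp_def, PySem.List.pyGetD_natCast, List.getD]

-- ===== VERDICT (by name: the statement is the Claim_ definition above) =====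
theorem get_drv_function_spec : Claim_equal_get_drv_function := by
  intro m _
  unfold Spec_get_drv_function get_drv_function get_drv_function_alt
  set l := (PySem.Dict.ofList m).values with hl
  have hsize : (PySem.Dict.ofList m).size = l.length := by
    simp [PySem.Dict.size, PySem.Dict.values, hl]
  rw [PySem.List.foldl_append_singleton_eq_map, List.nil_append, hsize,
    PySem.List.pyRange_zero_natCast, List.map_map, bfold_eq l [] 0, List.nil_append,
    ← afold_eq l 0]
  apply List.map_congr_left
  intro k _
  simp only [Function.comp_apply, inner_eq l k, zero_add]
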